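-- pv_equiv track=rewrite | github.com/e-nurtin/python_advanced_softuni | python_advanced/06_file_handling/exercise/02_line_numbers.py | count_alpha_and_punct
-- ===== SOURCE A (Python) =====
-- from string import punctuation
--
-- def count_alpha_and_punct(text):
-- 	punctuations, alphabet_letters = 0, 0
--
-- 	for char in text:
-- 		if char.isalpha():
-- 			alphabet_letters += 1
--
-- 		elif char in punctuation:
-- 			punctuations += 1
--
-- 	return alphabet_letters, punctuations
-- ===== SOURCE B (Python) =====
-- from string import punctuation
--
-- def count_alpha_and_punct(text):
--     # Build a char -> frequency table once, then aggregate over DISTINCT chars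
--     counts = {}
--     for ch in text:
--         counts[ch] = counts.get(ch, 0) + 1
--     alphabet_letters = sum(c for ch, c in counts.items() if ch.isalpha())
--     punctuations = sum(c for ch, c in counts.items() if ch in punctuation)
--     return alphabet_letters, punctuations
-- ===== Notes on version B (the rewrite author's own statement) =====
-- stated objective: alternative
-- what changed: B builds a char->frequency dictionary in one pass and then computes both totals by aggregating over the distinct characters weighted by their counts (punctuation counted directly, valid since no alphabetic char is punctuation), instead of A's per-character if/elif counting loop.
import Mathlib
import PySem

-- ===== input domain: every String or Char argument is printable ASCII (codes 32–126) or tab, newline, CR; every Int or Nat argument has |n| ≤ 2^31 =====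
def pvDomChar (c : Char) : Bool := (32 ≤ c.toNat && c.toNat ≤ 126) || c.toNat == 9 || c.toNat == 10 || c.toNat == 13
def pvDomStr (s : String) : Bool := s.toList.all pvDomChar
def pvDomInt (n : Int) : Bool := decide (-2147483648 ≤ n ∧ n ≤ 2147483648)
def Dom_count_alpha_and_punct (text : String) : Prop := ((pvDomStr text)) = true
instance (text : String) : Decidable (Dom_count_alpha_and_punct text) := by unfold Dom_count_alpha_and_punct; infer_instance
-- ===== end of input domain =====

-- B replaces A's per-character if/elif counting loop by a frequency dictionary aggregated over distinct characters (alternative decomposition, same cost).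

-- string.punctuation as a list of characters ('char in punctuation' on a 1-char string is exactly membership of that char)
def punctList : List Char := "!\"#$%&'()*+,-./:;<=>?@[\\]^_`{|}~".toList

-- ===== PORT A =====
def count_alpha_and_punct (text : String) : Int × Int :=
  let st := text.toList.foldl
    (fun (st : Int × Int) c =>
      if PySem.Chars.isalpha c then (st.1, st.2 + 1)
      else if punctList.contains c then (st.1 + 1, st.2)
      else st)
    ((0 : Int), (0 : Int))
  (st.2, st.1)

-- ===== PORT B =====
def count_alpha_and_punct_alt (text : String) : Int × Int :=
  let counts := text.toList.foldl
    (fun (d : PySem.Dict Char Int) ch => d.insert ch (d.getD ch 0 + 1)) PySem.Dict.empty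
  let alpha := counts.items.foldl
    (fun (a : Int) kc => if PySem.Chars.isalpha kc.1 then a + kc.2 else a) 0
  let punct := counts.items.foldl
    (fun (a : Int) kc => if punctList.contains kc.1 then a + kc.2 else a) 0
  (alpha, punct)

-- ===== PRECONDITION & SPEC =====
def Spec_count_alpha_and_punct (text : String) (out : Int × Int) : Prop := out = count_alpha_and_punct_alt text
instance (text : String) (out : Int × Int) : Decidable (Spec_count_alpha_and_punct text out) := by unfold Spec_count_alpha_and_punct; infer_instance

-- ===== CLAIM (what is proved, stated in full; the proofs are below) =====
def Claim_equal_count_alpha_and_punct : Prop := ∀ (text : String), Dom_count_alpha_and_punct text → Spec_count_alpha_and_punct text (count_alpha_and_punct text)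

-- ===== LEMMAS AND PROOFS =====

-- no punctuation character is alphabetic
theorem punct_all_not_alpha : punctList.all (fun c => !PySem.Chars.isalpha c) = true := by decide

theorem punct_not_alpha (c : Char) (hc : c ∈ punctList) : PySem.Chars.isalpha c = false := by
  simpa using List.all_eq_true.mp punct_all_not_alpha c hc

-- A's loop, characterised
theorem portA_fold (xs : List Char) : ∀ (p a : Int),
    xs.foldl (fun (st : Int × Int) c =>
      if PySem.Chars.isalpha c then (st.1, st.2 + 1)
      else if punctList.contains c then (st.1 + 1, st.2)
      else st) (p, a)
    = (p + (xs.countP (fun c => punctList.contains c) : Int),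
       a + (xs.countP (fun c => PySem.Chars.isalpha c) : Int)) := by
  induction xs with
  | nil => simp
  | cons x xs ih =>
    intro p a
    rw [List.foldl_cons]
    by_cases hx : PySem.Chars.isalpha x
    · have hnp : x ∉ punctList := fun hcm => by simp [punct_not_alpha x hcm] at hx
      have hstep : (if PySem.Chars.isalpha x then ((p, a).1, (p, a).2 + 1)
          else if punctList.contains x then ((p, a).1 + 1, (p, a).2)
          else (p, a)) = (p, a + 1) := by simp [hx]
      rw [hstep, ih, List.countP_cons, List.countP_cons]
      simp [hx, hnp, Prod.ext_iff]
      omega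
    · by_cases hc : x ∈ punctList
      · have hstep : (if PySem.Chars.isalpha x then ((p, a).1, (p, a).2 + 1)
          else if punctList.contains x then ((p, a).1 + 1, (p, a).2)
          else (p, a)) = (p + 1, a) := by simp [hx, hc]
        rw [hstep, ih, List.countP_cons, List.countP_cons]
        simp [hx, hc, Prod.ext_iff]
        omega
      · have hstep : (if PySem.Chars.isalpha x then ((p, a).1, (p, a).2 + 1)
          else if punctList.contains x then ((p, a).1 + 1, (p, a).2)
          else (p, a)) = (p, a) := by simp [hx, hc]
        rw [hstep, ih, List.countP_cons, List.countP_cons]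
        simp [hx, hc]

-- B's aggregation over the pairs (k, xs.count k), characterised as a weighted sum
theorem foldB (p : Char → Bool) (xs s : List Char) : ∀ (a : Int),
    ((s.map (fun k => (k, (xs.count k : Int)))).foldl
      (fun (a : Int) kc => if p kc.1 then a + kc.2 else a) a)
    = a + (((s.filter p).map (fun k => (xs.count k : Int))).sum) := by
  induction s with
  | nil => simp
  | cons k s ih =>
    intro a
    by_cases hk : p k
    · simp [hk, ih]; ring
    · simp [hk, ih]

-- one distinct occurrence: summing (if x = k then 1 else 0) over a nodup list containing x
theorem sum_indicator (x : Char) (p : Char → Bool) : ∀ (s : List Char), s.Nodup → x ∈ s →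
    (((s.filter p).map (fun k => if x = k then (1 : Int) else 0)).sum) = if p x then 1 else 0 := by
  intro s
  induction s with
  | nil => simp
  | cons k s ih =>
    intro hnd hmem
    rcases List.mem_cons.mp hmem with h | h
    · subst h
      have hxs : x ∉ s := (List.nodup_cons.mp hnd).1
      have hz : ((s.filter p).map (fun k => if x = k then (1 : Int) else 0)).sum = 0 := by
        apply List.sum_eq_zero
        intro i hi
        simp only [List.mem_map] at hi
        obtain ⟨k', hk', rfl⟩ := hi
        have : x ≠ k' := fun h => hxs (h ▸ (List.mem_filter.mp hk').1)
        simp [this]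
      by_cases hp : p x
      · simp [hp, hz]
      · simp [hp, hz]
    · have hxk : x ≠ k := by
        rintro rfl; exact (List.nodup_cons.mp hnd).1 h
      have := ih (List.nodup_cons.mp hnd).2 h
      by_cases hp : p k <;> simp [hp, hxk, this]

-- weighted sum over a nodup superset of xs's elements = countP over xs
theorem weighted_sum_eq_countP (p : Char → Bool) (s : List Char) (hnd : s.Nodup) :
    ∀ (xs : List Char), (∀ x ∈ xs, x ∈ s) →
    (((s.filter p).map (fun k => (xs.count k : Int))).sum) = (xs.countP p : Int) := by
  intro xs
  induction xs with
  | nil => intro _; simp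
  | cons x xs ih =>
    intro hcov
    have h1 : ∀ k, ((x :: xs).count k : Int) = (xs.count k : Int) + (if x = k then 1 else 0) := by
      intro k
      by_cases hk : k = x
      · subst hk; simp
      · have : ¬ (x = k) := fun h => hk h.symm
        simp [Ne.symm hk]
    have hfun : (fun k : Char => ((x :: xs).count k : Int))
        = (fun k : Char => (xs.count k : Int) + (if x = k then (1 : Int) else 0)) :=
      funext h1
    have hsplit : ((s.filter p).map (fun k => ((x :: xs).count k : Int))).sum
        = ((s.filter p).map (fun k => (xs.count k : Int))).sum
          + ((s.filter p).map (fun k => if x = k then (1 : Int) else 0)).sum := by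
      rw [hfun, List.sum_map_add]
    rw [hsplit, ih (fun y hy => hcov y (List.mem_cons_of_mem _ hy)),
        sum_indicator x p s hnd (hcov x (List.mem_cons_self))]
    by_cases hp : p x <;> simp [hp]

-- ===== VERDICT (by name: the statement is the Claim_ definition above) =====
theorem count_alpha_and_punct_spec : Claim_equal_count_alpha_and_punct := by
  intro text _
  unfold Spec_count_alpha_and_punct count_alpha_and_punct count_alpha_and_punct_alt
  simp only [PySem.Dict.foldl_insert_getD_add_one_eq_counter, PySem.Dict.items_counter,
    portA_fold, foldB]
  rw [weighted_sum_eq_countP _ _ (PySem.Set.nodup_ofList text.toList) text.toList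
        (fun x hx => (PySem.Set.mem_ofList _ _).mpr hx),
      weighted_sum_eq_countP _ _ (PySem.Set.nodup_ofList text.toList) text.toList
        (fun x hx => (PySem.Set.mem_ofList _ _).mpr hx)]
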